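-- pv_equiv track=rewrite | github.com/Airyshtoteles/learnLeetCode | Day25/Part3/mirror_code.py | max_ones_with_reflection
-- ===== SOURCE A (Python) =====
-- def max_ones_with_reflection(s: str, k: int) -> int:
--     n = len(s)
--     if n == 0: return 0
--     # collect zero runs as intervals [L,R]
--     zero_runs = []
--     i = 0
--     while i < n:
--         if s[i] == '0':
--             j = i
--             while j+1 < n and s[j+1] == '0':
--                 j += 1
--             zero_runs.append((i,j))
--             i = j+1
--         else:
--             i += 1
--     if not zero_runs:
--         return n
--     if k == 0:
--         # return max existing ones run
--         best = 0
--         i = 0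
--         while i < n:
--             if s[i] == '1':
--                 j = i
--                 while j+1 < n and s[j+1] == '1':
--                     j += 1
--                 best = max(best, j-i+1)
--                 i = j+1
--             else:
--                 i += 1
--         return best
--     # sliding window over zero_runs selecting up to k contiguous runs
--     m = len(zero_runs)
--     ans = 0
--     l = 0
--     for r in range(m):
--         # maintain window size l..r with size <= k by moving l only if more than k
--         while r - l + 1 > k:
--             l += 1
--         # compute span [L,R]
--         L = zero_runs[l][0]
--         R = zero_runs[r][1]
--         span = R - L + 1
--         # include ones between and inside: total covered = R-L+1 after flips, but ones between are counted automatically as they are within [L,R]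
--         length = span
--         # reflect bonus
--         if L-1 >= 0 and s[L-1] == '0':
--             length += 1
--         if R+1 < n and s[R+1] == '0':
--             length += 1
--         # but we can also extend through existing ones outside contiguous zeros: include outer ones adjacent to the span
--         # extend left through consecutive '1's before L
--         a = L-1
--         while a >= 0 and s[a] == '1':
--             length += 1
--             a -= 1
--         # extend right through consecutive '1's after R
--         b = R+1
--         while b < n and s[b] == '1':
--             length += 1
--             b += 1
--         ans = max(ans, length)
--     # If k >= number of zero runs, flipping them all makes all 1s; ensure cap at n
--     return min(ans, n)
-- ===== SOURCE B (Python) =====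
-- def max_ones_with_reflection(s: str, k: int) -> int:
--     n = len(s)
--     if n == 0:
--         return 0
--     # ones_before[i] = length of the '1'-streak ending just before index i
--     ones_before = [0]
--     for c in s:
--         ones_before.append(ones_before[-1] + 1 if c == '1' else 0)
--     # ones_after[i] = length of the '1'-streak starting at index i
--     ones_after = [0]
--     for c in reversed(s):
--         ones_after.append(ones_after[-1] + 1 if c == '1' else 0)
--     ones_after.reverse()
--     # start / end indices of the maximal zero runs
--     zstart = [i for i in range(n) if s[i] == '0' and (i == 0 or s[i-1] != '0')]
--     zend = [i for i in range(n) if s[i] == '0' and (i == n-1 or s[i+1] != '0')]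
--     m = len(zstart)
--     if m == 0:
--         return n
--     if k <= 0:
--         return max(ones_before)
--     best = 0
--     for r in range(m):
--         l = max(0, r - k + 1)
--         cand = zend[r] - zstart[l] + 1 + ones_before[zstart[l]] + ones_after[zend[r] + 1]
--         best = max(best, cand)
--     return min(best, n)
-- ===== Notes on version B (the rewrite author's own statement) =====
-- stated objective: alternative
-- what changed: Replaces A's while-loop window maintenance and per-window character-by-character ones-extension scans with precomputed ones-streak prefix/suffix arrays, filter-built zero-run boundary lists and an arithmetic window start.
-- crash fix: On k < 0 with at least one '0' in s, A raises IndexError (the window lower bound overruns zero_runs); B returns the longest existing run of '1's. — e.g. on max_ones_with_reflection("1101", -1): A raises IndexError, B returns 2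
import Mathlib
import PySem

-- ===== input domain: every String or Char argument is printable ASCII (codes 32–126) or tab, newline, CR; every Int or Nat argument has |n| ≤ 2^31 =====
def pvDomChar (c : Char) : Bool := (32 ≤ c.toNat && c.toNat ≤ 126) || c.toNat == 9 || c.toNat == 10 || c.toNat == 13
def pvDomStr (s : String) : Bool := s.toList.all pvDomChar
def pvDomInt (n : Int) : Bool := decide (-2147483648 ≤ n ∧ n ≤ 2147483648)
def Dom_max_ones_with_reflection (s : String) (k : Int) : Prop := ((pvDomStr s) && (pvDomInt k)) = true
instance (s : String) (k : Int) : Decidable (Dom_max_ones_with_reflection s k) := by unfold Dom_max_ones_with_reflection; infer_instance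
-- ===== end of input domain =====

-- B replaces A's per-window one-character extension scans and while-loop window maintenance by
-- precomputed ones-streak prefix/suffix arrays and an arithmetic window start (alternative algorithm).
-- Pre_ excludes k < 0 with a '0' present, where A raises IndexError (see Raises_ block).

-- ===== PORT A =====
-- inner while of the zero-run collector: while j+1<n and s[j+1]=='0': j += 1
def zrInner (cs : List Char) (j : Nat) : Nat :=
  if h : j + 1 < cs.length ∧ cs.getD (j+1) ' ' = '0' then zrInner cs (j+1) else j
termination_by cs.length - j
decreasing_by omega

theorem zrInner_ge (cs : List Char) (j : Nat) : j ≤ zrInner cs j := by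
  fun_induction zrInner with
  | case1 j h ih => omega
  | case2 j h => omega

-- outer while of the zero-run collector
def zrLoop (cs : List Char) (i : Nat) : List (Nat × Nat) :=
  if h : i < cs.length then
    if cs.getD i ' ' = '0' then
      (i, zrInner cs i) :: zrLoop cs (zrInner cs i + 1)
    else zrLoop cs (i+1)
  else []
termination_by cs.length - i
decreasing_by
  · have := zrInner_ge cs i; omega
  · omega

-- inner while of the k==0 branch: while j+1<n and s[j+1]=='1': j += 1
def onesInner (cs : List Char) (j : Nat) : Nat :=
  if h : j + 1 < cs.length ∧ cs.getD (j+1) ' ' = '1' then onesInner cs (j+1) else j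
termination_by cs.length - j
decreasing_by omega

theorem onesInner_ge (cs : List Char) (j : Nat) : j ≤ onesInner cs j := by
  fun_induction onesInner with
  | case1 j h ih => omega
  | case2 j h => omega

-- outer while of the k==0 branch, carrying best
def onesLoop (cs : List Char) (i best : Nat) : Nat :=
  if h : i < cs.length then
    if cs.getD i ' ' = '1' then
      onesLoop cs (onesInner cs i + 1) (max best (onesInner cs i - i + 1))
    else onesLoop cs (i+1) best
  else best
termination_by cs.length - i
decreasing_by
  · have := onesInner_ge cs i; omega
  · omega

-- while a >= 0 and s[a] == '1': length += 1; a -= 1   (counts the added amount)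
def extL (cs : List Char) (a : Int) : Int :=
  if h : 0 ≤ a ∧ cs.getD a.toNat ' ' = '1' then extL cs (a - 1) + 1 else 0
termination_by (a + 1).toNat
decreasing_by omega

-- while b < n and s[b] == '1': length += 1; b += 1   (counts the added amount)
def extR (cs : List Char) (b : Nat) : Int :=
  if h : b < cs.length ∧ cs.getD b ' ' = '1' then extR cs (b + 1) + 1 else 0
termination_by cs.length - b
decreasing_by omega

-- while r - l + 1 > k: l += 1
def lFinal (l r : Nat) (k : Int) : Nat :=
  if h : (r : Int) - l + 1 > k then lFinal (l + 1) r k else l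
termination_by ((r : Int) + 1 - k - l).toNat
decreasing_by omega

-- for r in range(m) with persistent l and ans; none = IndexError (zero_runs[l] out of range).
-- span, the two reflect-bonus ifs and the two extension scans are inlined in the recursive call.
def winLoop (cs : List Char) (zr : List (Nat × Nat)) (k : Int) (r l : Nat) (ans : Int) : Option Int :=
  if _hr : r < zr.length then
    match zr[lFinal l r k]? with
    | none => none
    | some LP =>
      winLoop cs zr k (r + 1) (lFinal l r k)
        (max ans ((((zr.getD r (0, 0)).2 : Int) - (LP.1 : Int) + 1
          + (if 1 ≤ LP.1 ∧ cs.getD (LP.1 - 1) ' ' = '0' then 1 else 0)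
          + (if (zr.getD r (0, 0)).2 + 1 < cs.length ∧ cs.getD ((zr.getD r (0, 0)).2 + 1) ' ' = '0' then 1 else 0))
          + extL cs ((LP.1 : Int) - 1) + extR cs ((zr.getD r (0, 0)).2 + 1)))
  else some ans
termination_by zr.length - r
decreasing_by omega

def max_ones_with_reflection (s : String) (k : Int) : Int :=
  let cs := s.toList
  if cs.length = 0 then 0
  else
    let zr := zrLoop cs 0
    if zr = [] then (cs.length : Int)
    else if k = 0 then (onesLoop cs 0 0 : Int)
    else
      match winLoop cs zr k 0 0 0 with
      | some ans => min ans (cs.length : Int)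
      | none => 0   -- Python raises IndexError here (k < 0); excluded by Pre_

-- ===== PORT B =====
-- ones_before = [0]; for c in s: ones_before.append(ones_before[-1] + 1 if c == '1' else 0)
def obList (cs : List Char) : List Nat :=
  cs.foldl (fun acc c => acc ++ [if c = '1' then acc.getLast?.getD 0 + 1 else 0]) [0]

-- same backward, then reversed
def oaList (cs : List Char) : List Nat :=
  (cs.reverse.foldl (fun acc c => acc ++ [if c = '1' then acc.getLast?.getD 0 + 1 else 0]) [0]).reverse

def zstartL (cs : List Char) : List Nat :=
  (List.range cs.length).filter (fun i => cs.getD i ' ' = '0' ∧ (i = 0 ∨ cs.getD (i - 1) ' ' ≠ '0'))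

def zendL (cs : List Char) : List Nat :=
  (List.range cs.length).filter (fun i => cs.getD i ' ' = '0' ∧ (i = cs.length - 1 ∨ cs.getD (i + 1) ' ' ≠ '0'))

def max_ones_with_reflection_alt (s : String) (k : Int) : Int :=
  let cs := s.toList
  if cs.length = 0 then 0
  else
    let ob := obList cs
    let oa := oaList cs
    let zs := zstartL cs
    let ze := zendL cs
    let m := zs.length
    if m = 0 then (cs.length : Int)
    else if k ≤ 0 then
      -- max(ones_before): Python's max of a (nonempty) int list = fold of max from its head
      (match ob with | [] => (0 : Nat) | x :: t => t.foldl max x : Nat)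
    else
      let best := (List.range m).foldl (fun (best : Int) (r : Nat) =>
        let l := (max 0 ((r : Int) - k + 1)).toNat
        let cand : Int := (ze.getD r 0 : Int) - (zs.getD l 0 : Int) + 1
                          + (ob.getD (zs.getD l 0) 0 : Int) + (oa.getD (ze.getD r 0 + 1) 0 : Int)
        max best cand) 0
      min best (cs.length : Int)

-- ===== PRECONDITION & SPEC =====
-- Pre_ excludes exactly k < 0 together with a '0' in s: there A's window lower bound l overruns
-- zero_runs and Python raises IndexError (A returns no value).
def Pre_max_ones_with_reflection (s : String) (k : Int) : Prop :=
  0 ≤ k ∨ ¬ ('0' ∈ s.toList)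
instance (s : String) (k : Int) : Decidable (Pre_max_ones_with_reflection s k) := by
  unfold Pre_max_ones_with_reflection; infer_instance

def pvWitness_max_ones_with_reflection : String × Int := ("0110100", 2)

-- On k < 0 with a '0' present A raises IndexError; B returns the longest existing run of '1's.
def Raises_max_ones_with_reflection (s : String) (k : Int) : Prop :=
  k < 0 ∧ '0' ∈ s.toList
instance (s : String) (k : Int) : Decidable (Raises_max_ones_with_reflection s k) := by
  unfold Raises_max_ones_with_reflection; infer_instance

def pvRaiseWitness_max_ones_with_reflection : String × Int := ("1101", -1)
def pvRaiseWitnessOut_max_ones_with_reflection : Int := 2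

def Spec_max_ones_with_reflection (s : String) (k : Int) (out : Int) : Prop :=
  out = max_ones_with_reflection_alt s k
instance (s : String) (k : Int) (out : Int) : Decidable (Spec_max_ones_with_reflection s k out) := by
  unfold Spec_max_ones_with_reflection; infer_instance

-- ===== CLAIM (what is proved, stated in full; the proofs are below) =====
def Claim_equal_max_ones_with_reflection : Prop :=
  ∀ (s : String) (k : Int), Dom_max_ones_with_reflection s k →
    Pre_max_ones_with_reflection s k →
    Spec_max_ones_with_reflection s k (max_ones_with_reflection s k)

def Claim_raises_max_ones_with_reflection : Prop :=
  (∀ (s : String) (k : Int), Dom_max_ones_with_reflection s k →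
      Raises_max_ones_with_reflection s k → ¬ Pre_max_ones_with_reflection s k) ∧
  (Dom_max_ones_with_reflection (pvRaiseWitness_max_ones_with_reflection.1) (pvRaiseWitness_max_ones_with_reflection.2) ∧
   Raises_max_ones_with_reflection (pvRaiseWitness_max_ones_with_reflection.1) (pvRaiseWitness_max_ones_with_reflection.2) ∧
   max_ones_with_reflection_alt (pvRaiseWitness_max_ones_with_reflection.1) (pvRaiseWitness_max_ones_with_reflection.2) = pvRaiseWitnessOut_max_ones_with_reflection)

-- ===== LEMMAS AND PROOFS =====
def osfx (l : List Char) : Nat := (l.reverse.takeWhile (· = '1')).length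
def opfx (l : List Char) : Nat := (l.takeWhile (· = '1')).length

theorem osfx_take_succ (cs : List Char) (i : Nat) (h : i < cs.length) :
    osfx (cs.take (i+1)) = if cs.getD i ' ' = '1' then osfx (cs.take i) + 1 else 0 := by
  have hx : cs.take (i+1) = cs.take i ++ [cs[i]] := by
    rw [List.take_add_one]
    simp [List.getElem?_eq_getElem h]
  have hg : cs.getD i ' ' = cs[i] := List.getD_eq_getElem cs ' ' h
  rw [hx, hg]
  unfold osfx
  rw [List.reverse_append]
  by_cases hc : cs[i] = '1' <;> simp [hc]

theorem opfx_drop_succ (cs : List Char) (i : Nat) (h : i < cs.length) :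
    opfx (cs.drop i) = if cs.getD i ' ' = '1' then opfx (cs.drop (i+1)) + 1 else 0 := by
  have hx : cs.drop i = cs[i] :: cs.drop (i+1) := List.drop_eq_getElem_cons h
  have hg : cs.getD i ' ' = cs[i] := List.getD_eq_getElem cs ' ' h
  rw [hx, hg]
  by_cases hc : cs[i] = '1' <;> simp [opfx, hc]

theorem extR_eq (cs : List Char) (b : Nat) :
    extR cs b = (opfx (cs.drop b) : Nat) := by
  fun_induction extR with
  | case1 b h ih =>
    rw [ih, opfx_drop_succ cs b h.1, if_pos h.2]
    push_cast; ring
  | case2 b h =>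
    by_cases hb : b < cs.length
    · have hc : ¬ cs.getD b ' ' = '1' := fun hc => h ⟨hb, hc⟩
      rw [opfx_drop_succ cs b hb, if_neg hc]
      norm_num
    · rw [List.drop_eq_nil_of_le (by omega)]
      simp [opfx]

theorem extL_eq (cs : List Char) (i : Nat) (h : i ≤ cs.length) :
    extL cs ((i : Int) - 1) = (osfx (cs.take i) : Nat) := by
  induction i with
  | zero =>
    rw [extL]
    simp [osfx]
  | succ n ih =>
    have hn : n < cs.length := by omega
    have ht : ((n+1 : Nat) : Int) - 1 = (n : Int) := by push_cast; ring
    rw [ht, extL, osfx_take_succ cs n hn]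
    simp only [Int.toNat_natCast]
    by_cases hc : cs.getD n ' ' = '1'
    · rw [dif_pos ⟨by positivity, hc⟩, if_pos hc, ih (by omega)]
      push_cast; ring
    · rw [dif_neg (by tauto), if_neg hc]
      norm_num

theorem foldl_max_init (l : List Nat) (a : Nat) : l.foldl max a = max a (l.foldl max 0) := by
  induction l generalizing a with
  | nil => simp
  | cons x t ih =>
    simp only [List.foldl_cons]
    rw [ih (max a x), ih (max 0 x)]
    omega

theorem foldl_max_le (l : List Nat) (a c : Nat) (ha : a ≤ c) (h : ∀ y ∈ l, y ≤ c) :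
    l.foldl max a ≤ c := by
  induction l generalizing a with
  | nil => simpa
  | cons x t ih =>
    simp only [List.foldl_cons]
    exact ih (max a x) (by have := h x (by simp); omega) (fun y hy => h y (by simp [hy]))

theorem lFinal_spec (l r : Nat) (k : Int) :
    lFinal l r k = if (r : Int) - l + 1 ≤ k then l else ((r : Int) + 1 - k).toNat := by
  fun_induction lFinal with
  | case1 l h ih =>
    rw [ih]
    split
    · next h2 => have h3 : (l + 1 : Nat) = ((r:Int)+1-k).toNat := by omega
                 rw [if_neg (by omega), ← h3]
    · rw [if_neg (by omega)]
  | case2 l h => rw [if_pos (by omega)]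

theorem osfx_append_one (l : List Char) (c : Char) :
    osfx (l ++ [c]) = if c = '1' then osfx l + 1 else 0 := by
  unfold osfx
  rw [List.reverse_append]
  by_cases hc : c = '1' <;> simp [hc]

theorem scan_eq (l : List Char) :
    l.foldl (fun acc c => acc ++ [if c = '1' then acc.getLast?.getD 0 + 1 else 0]) [0]
      = (List.range (l.length + 1)).map (fun i => osfx (l.take i)) := by
  induction l using List.reverseRecOn with
  | nil => simp [osfx]
  | append_singleton t c ih =>
    rw [List.foldl_append, ih]
    simp only [List.foldl_cons, List.foldl_nil]
    have hn : (t ++ [c]).length + 1 = (t.length + 1) + 1 := by simp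
    rw [hn, List.range_succ (n := t.length + 1), List.map_append]
    congr 1
    · apply List.map_congr_left
      intro i hi
      simp only [List.mem_range] at hi
      rw [List.take_append_of_le_length (by omega)]
    · simp only [List.map_cons, List.map_nil]
      have hlast : (List.map (fun i => osfx (List.take i t)) (List.range (t.length + 1))).getLast?.getD 0 = osfx t := by
        rw [List.range_succ, List.map_append]
        simp
      rw [hlast]
      have htake : List.take (t.length + 1) (t ++ [c]) = t ++ [c] := by
        apply List.take_of_length_le
        simp
      rw [htake, osfx_append_one]

theorem obList_eq (cs : List Char) :
    obList cs = (List.range (cs.length + 1)).map (fun i => osfx (cs.take i)) := scan_eq cs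

theorem oaList_eq (cs : List Char) :
    oaList cs = (List.range (cs.length + 1)).map (fun i => opfx (cs.drop i)) := by
  unfold oaList
  rw [scan_eq, List.length_reverse, ← List.map_reverse]
  rw [List.range_eq_range' (n := cs.length + 1), List.reverse_range', List.map_map]
  rw [← List.range_eq_range']
  apply List.map_congr_left
  intro i hi
  simp only [List.mem_range] at hi
  simp only [Function.comp]
  rw [List.take_reverse]
  have h1 : cs.length - (0 + (cs.length + 1) - 1 - i) = i := by omega
  rw [h1]
  unfold osfx opfx
  rw [List.reverse_reverse]

theorem mapRange_getD (f : Nat → Nat) (n i : Nat) (h : i < n) :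
    ((List.range n).map f).getD i 0 = f i := by
  rw [List.getD_eq_getElem _ _ (by simpa using h)]
  simp

theorem obList_getD (cs : List Char) (i : Nat) (h : i ≤ cs.length) :
    (obList cs).getD i 0 = osfx (cs.take i) := by
  rw [obList_eq, mapRange_getD _ _ _ (by omega)]

theorem oaList_getD (cs : List Char) (i : Nat) (h : i ≤ cs.length) :
    (oaList cs).getD i 0 = opfx (cs.drop i) := by
  rw [oaList_eq, mapRange_getD _ _ _ (by omega)]

def ZSfrom (cs : List Char) (i : Nat) : List Nat :=
  (List.range' i (cs.length - i)).filter (fun p => cs.getD p ' ' = '0' ∧ (p = i ∨ cs.getD (p - 1) ' ' ≠ '0'))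
def ZEfrom (cs : List Char) (i : Nat) : List Nat :=
  (List.range' i (cs.length - i)).filter (fun p => cs.getD p ' ' = '0' ∧ (p = cs.length - 1 ∨ cs.getD (p + 1) ' ' ≠ '0'))

theorem zrInner_spec (cs : List Char) (i : Nat) :
    i < cs.length → cs.getD i ' ' = '0' →
    zrInner cs i < cs.length ∧
    (∀ p, i ≤ p → p ≤ zrInner cs i → cs.getD p ' ' = '0') ∧
    (zrInner cs i + 1 = cs.length ∨ cs.getD (zrInner cs i + 1) ' ' ≠ '0') := by
  fun_induction zrInner with
  | case1 j h ih =>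
    intro hj h0
    obtain ⟨ih1, ih2, ih3⟩ := ih h.1 h.2
    refine ⟨ih1, ?_, ih3⟩
    intro p hp1 hp2
    rcases Nat.eq_or_lt_of_le hp1 with rfl | hlt
    · exact h0
    · exact ih2 p hlt hp2
  | case2 j h =>
    intro hj h0
    refine ⟨hj, ?_, ?_⟩
    · intro p hp1 hp2
      have : p = j := by omega
      simpa [this] using h0
    · by_cases hn : j + 1 < cs.length
      · right; exact fun hc => h ⟨hn, hc⟩
      · left; omega

theorem zr_both (cs : List Char) (i : Nat) :
    (zrLoop cs i).map Prod.fst = ZSfrom cs i ∧ (zrLoop cs i).map Prod.snd = ZEfrom cs i := by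
  fun_induction zrLoop with
  | case1 i hi h0 ih =>
    obtain ⟨hjn, hrun, hmax⟩ := zrInner_spec cs i hi h0
    have hij : i ≤ zrInner cs i := zrInner_ge cs i
    set j := zrInner cs i with hj
    have hsplit : List.range' i (cs.length - i)
        = List.range' i (j + 1 - i) ++ List.range' (j + 1) (cs.length - (j + 1)) := by
      rw [show cs.length - i = (j + 1 - i) + (cs.length - (j + 1)) from by omega]
      rw [← List.range'_append_1, show i + (j + 1 - i) = j + 1 from by omega]
    constructor
    · simp only [List.map_cons, ih.1]
      unfold ZSfrom
      have hsplit2 : List.range' i (j + 1 - i) = i :: List.range' (i + 1) (j - i) := by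
        rw [show j + 1 - i = (j - i) + 1 from by omega, List.range'_succ]
      rw [hsplit, List.filter_append, hsplit2, List.filter_cons]
      rw [if_pos (by simp only [decide_eq_true_eq]; exact ⟨h0, Or.inl trivial⟩)]
      rw [(List.filter_eq_nil_iff (l := List.range' (i + 1) (j - i))).mpr ?side1]
      case side1 =>
        intro p hp
        obtain ⟨hp1, hp2⟩ := List.mem_range'_1.mp hp
        have hpm1 : cs.getD (p - 1) ' ' = '0' := hrun (p - 1) (by omega) (by omega)
        simp only [decide_eq_true_eq, not_and, not_or]
        exact fun _ => ⟨by omega, fun hc => hc hpm1⟩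
      rw [List.singleton_append]
      congr 1
      apply List.filter_congr
      intro p hp
      obtain ⟨hp1, hp2⟩ := List.mem_range'_1.mp hp
      by_cases hpj : p = j + 1
      · subst hpj
        have hne : cs.getD (j + 1) ' ' ≠ '0' := by
          rcases hmax with h | h
          · omega
          · exact h
        simp only [decide_eq_decide]
        exact ⟨fun hc => absurd hc.1 hne, fun hc => absurd hc.1 hne⟩
      · have h1 : ¬ (p = i) := by omega
        simp [h1, hpj]
    · simp only [List.map_cons, ih.2]
      unfold ZEfrom
      have hsplit3 : List.range' i (j + 1 - i) = List.range' i (j - i) ++ [j] := by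
        rw [show j + 1 - i = (j - i) + 1 from by omega]
        have h4 : i + (j - i) = j := by omega
        rw [← List.range'_append_1 (s := i) (m := j - i) (n := 1), h4, List.range'_one]
      rw [hsplit, List.filter_append, hsplit3, List.filter_append]
      rw [(List.filter_eq_nil_iff (l := List.range' i (j - i))).mpr ?side2]
      case side2 =>
        intro p hp
        obtain ⟨hp1, hp2⟩ := List.mem_range'_1.mp hp
        have hp3 : cs.getD (p + 1) ' ' = '0' := hrun (p + 1) (by omega) (by omega)
        simp only [decide_eq_true_eq, not_and, not_or]
        exact fun _ => ⟨by omega, fun hc => hc hp3⟩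
      rw [List.nil_append, List.filter_cons]
      rw [if_pos ?side3]
      case side3 =>
        have hj0 : cs.getD j ' ' = '0' := hrun j (by omega) (by omega)
        simp only [decide_eq_true_eq]
        refine ⟨hj0, ?_⟩
        rcases hmax with h | h
        · left; omega
        · right; exact h
      simp
  | case2 i hi h0 ih =>
    have hsplit : List.range' i (cs.length - i) = i :: List.range' (i + 1) (cs.length - (i + 1)) := by
      rw [show cs.length - i = (cs.length - (i + 1)) + 1 from by omega, List.range'_succ]
    constructor
    · rw [ih.1]
      unfold ZSfrom
      rw [hsplit, List.filter_cons,
          if_neg (by simp only [decide_eq_true_eq]; exact fun hc => h0 hc.1)]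
      apply List.filter_congr
      intro p hp
      obtain ⟨hp1, hp2⟩ := List.mem_range'_1.mp hp
      by_cases hpi : p = i + 1
      · subst hpi
        simp only [decide_eq_decide]
        exact ⟨fun hc => ⟨hc.1, Or.inr h0⟩, fun hc => ⟨hc.1, Or.inl trivial⟩⟩
      · have h1 : ¬ (p = i) := by omega
        simp [h1, hpi]
    · rw [ih.2]
      unfold ZEfrom
      rw [hsplit, List.filter_cons,
          if_neg (by simp only [decide_eq_true_eq]; exact fun hc => h0 hc.1)]
  | case3 i hi =>
    have h0 : cs.length - i = 0 := by omega
    constructor <;> simp [ZSfrom, ZEfrom, h0]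

theorem zstartL_eq (cs : List Char) : zstartL cs = ZSfrom cs 0 := by
  unfold zstartL ZSfrom
  rw [List.range_eq_range', Nat.sub_zero]

theorem zendL_eq (cs : List Char) : zendL cs = ZEfrom cs 0 := by
  unfold zendL ZEfrom
  rw [List.range_eq_range', Nat.sub_zero]

theorem zr_fst (cs : List Char) : (zrLoop cs 0).map Prod.fst = zstartL cs := by
  rw [zstartL_eq]; exact (zr_both cs 0).1

theorem zr_snd (cs : List Char) : (zrLoop cs 0).map Prod.snd = zendL cs := by
  rw [zendL_eq]; exact (zr_both cs 0).2

theorem zr_zip (cs : List Char) : zrLoop cs 0 = (zstartL cs).zip (zendL cs) := by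
  rw [← zr_fst, ← zr_snd]
  exact List.zip_of_prod rfl rfl

theorem zlen_eq (cs : List Char) : (zstartL cs).length = (zendL cs).length := by
  rw [← zr_fst, ← zr_snd, List.length_map, List.length_map]

theorem zstart_mem (cs : List Char) (p : Nat) (hp : p ∈ zstartL cs) :
    p < cs.length ∧ cs.getD p ' ' = '0' ∧ (p = 0 ∨ cs.getD (p - 1) ' ' ≠ '0') := by
  unfold zstartL at hp
  obtain ⟨hr, hc⟩ := List.mem_filter.mp hp
  simp only [decide_eq_true_eq] at hc
  exact ⟨List.mem_range.mp hr, hc.1, hc.2⟩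

theorem zend_mem (cs : List Char) (p : Nat) (hp : p ∈ zendL cs) :
    p < cs.length ∧ cs.getD p ' ' = '0' ∧ (p = cs.length - 1 ∨ cs.getD (p + 1) ' ' ≠ '0') := by
  unfold zendL at hp
  obtain ⟨hr, hc⟩ := List.mem_filter.mp hp
  simp only [decide_eq_true_eq] at hc
  exact ⟨List.mem_range.mp hr, hc.1, hc.2⟩

theorem onesInner_spec (cs : List Char) (i : Nat) :
    i < cs.length → cs.getD i ' ' = '1' →
    onesInner cs i < cs.length ∧
    (∀ p, i ≤ p → p ≤ onesInner cs i → cs.getD p ' ' = '1') ∧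
    (onesInner cs i + 1 = cs.length ∨ cs.getD (onesInner cs i + 1) ' ' ≠ '1') := by
  fun_induction onesInner with
  | case1 j h ih =>
    intro hj h0
    obtain ⟨ih1, ih2, ih3⟩ := ih h.1 h.2
    refine ⟨ih1, ?_, ih3⟩
    intro p hp1 hp2
    rcases Nat.eq_or_lt_of_le hp1 with rfl | hlt
    · exact h0
    · exact ih2 p hlt hp2
  | case2 j h =>
    intro hj h0
    refine ⟨hj, ?_, ?_⟩
    · intro p hp1 hp2
      have : p = j := by omega
      simpa [this] using h0
    · by_cases hn : j + 1 < cs.length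
      · right; exact fun hc => h ⟨hn, hc⟩
      · left; omega

theorem run_osfx (cs : List Char) (i j : Nat) (hjn : j < cs.length)
    (hrun : ∀ q, i ≤ q → q ≤ j → cs.getD q ' ' = '1') (h0 : osfx (cs.take i) = 0) :
    ∀ p, i ≤ p → p ≤ j + 1 → osfx (cs.take p) = p - i := by
  intro p
  induction p with
  | zero =>
    intro h1 h2
    have hi0 : i = 0 := by omega
    subst hi0
    simp [osfx]
  | succ q ihq =>
    intro h1 h2
    rcases Nat.eq_or_lt_of_le h1 with heq | hlt
    · rw [← heq, h0]; omega
    · have hq : i ≤ q := by omega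
      have hq2 : q ≤ j := by omega
      rw [osfx_take_succ cs q (by omega), if_pos (hrun q hq hq2), ihq hq (by omega)]
      omega

theorem onesLoop_eq (cs : List Char) (i best : Nat) (hin : i ≤ cs.length)
    (h1 : osfx (cs.take i) ≤ best)
    (h2 : i < cs.length → cs.getD i ' ' = '1' → osfx (cs.take i) = 0) :
    onesLoop cs i best =
      ((List.range' i (cs.length + 1 - i)).map (fun p => osfx (cs.take p))).foldl max best := by
  fun_induction onesLoop with
  | case1 i best hi hc ih =>
    obtain ⟨hjn, hrun, hmax⟩ := onesInner_spec cs i hi hc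
    have hij : i ≤ onesInner cs i := onesInner_ge cs i
    set j := onesInner cs i with hj
    have ht0 : osfx (cs.take i) = 0 := h2 hi hc
    have hrf : ∀ p, i ≤ p → p ≤ j + 1 → osfx (cs.take p) = p - i :=
      run_osfx cs i j hjn hrun ht0
    rw [ih (by omega) ?ih1 ?ih2]
    case ih1 =>
      rw [hrf (j+1) (by omega) (by omega)]
      omega
    case ih2 =>
      intro hn1 hc1
      rcases hmax with h | h
      · omega
      · exact absurd hc1 h
    rw [show cs.length + 1 - (j + 1) = cs.length - j from by omega]
    have hsplit : List.range' i (cs.length + 1 - i)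
        = List.range' i (j + 1 - i) ++ List.range' (j + 1) (cs.length - j) := by
      rw [show cs.length + 1 - i = (j + 1 - i) + (cs.length - j) from by omega]
      rw [← List.range'_append_1, show i + (j + 1 - i) = j + 1 from by omega]
    rw [hsplit, List.map_append, List.foldl_append]
    set M1 := ((List.range' i (j + 1 - i)).map (fun p => osfx (cs.take p))).foldl max best with hM1
    set K := ((List.range' (j + 1) (cs.length - j)).map (fun p => osfx (cs.take p))).foldl max 0 with hK
    rw [foldl_max_init _ M1, foldl_max_init _ (max best (j - i + 1))]
    rw [← hK]
    have hM1a : M1 ≤ max best (j - i) := by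
      apply foldl_max_le _ _ _ (by omega)
      intro y hy
      obtain ⟨p, hp, rfl⟩ := List.mem_map.mp hy
      obtain ⟨hp1, hp2⟩ := List.mem_range'_1.mp hp
      rw [hrf p hp1 (by omega)]
      omega
    have hM1b : best ≤ M1 := (PySem.List.le_foldl_max _ _).1
    have hM1c : j - i ≤ M1 := by
      have hmem : osfx (cs.take j) ∈ (List.range' i (j + 1 - i)).map (fun p => osfx (cs.take p)) :=
        List.mem_map.mpr ⟨j, List.mem_range'_1.mpr ⟨hij, by omega⟩, rfl⟩
      have := (PySem.List.le_foldl_max ((List.range' i (j + 1 - i)).map (fun p => osfx (cs.take p))) best).2 _ hmem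
      rwa [hrf j hij (by omega)] at this
    have hKa : j + 1 - i ≤ K := by
      have hmem : osfx (cs.take (j+1)) ∈ (List.range' (j + 1) (cs.length - j)).map (fun p => osfx (cs.take p)) :=
        List.mem_map.mpr ⟨j+1, List.mem_range'_1.mpr ⟨by omega, by omega⟩, rfl⟩
      have := (PySem.List.le_foldl_max ((List.range' (j + 1) (cs.length - j)).map (fun p => osfx (cs.take p))) 0).2 _ hmem
      rwa [hrf (j+1) (by omega) (by omega)] at this
    omega
  | case2 i best hi hc ih =>
    have hz : osfx (cs.take (i+1)) = 0 := by
      rw [osfx_take_succ cs i hi, if_neg hc]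
    rw [ih (by omega) (by omega) (fun _ _ => hz)]
    rw [show cs.length + 1 - i = (cs.length - i) + 1 from by omega, List.range'_succ]
    simp only [List.map_cons, List.foldl_cons]
    rw [show cs.length + 1 - (i + 1) = cs.length - i from by omega]
    congr 1
    omega
  | case3 i best hi =>
    have hieq : i = cs.length := by omega
    subst hieq
    rw [show cs.length + 1 - cs.length = 1 from by omega, List.range'_one]
    simp only [List.map_cons, List.map_nil, List.foldl_cons, List.foldl_nil]
    rw [List.take_length]
    rw [List.take_length] at h1
    omega

def bStep (cs : List Char) (k : Int) : Int → Nat → Int := fun best r =>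
  let l := (max 0 ((r : Int) - k + 1)).toNat
  let cand : Int := ((zendL cs).getD r 0 : Int) - ((zstartL cs).getD l 0 : Int) + 1
                    + ((obList cs).getD ((zstartL cs).getD l 0) 0 : Int)
                    + ((oaList cs).getD ((zendL cs).getD r 0 + 1) 0 : Int)
  max best cand

theorem winLoop_eq (cs : List Char) (k : Int) (hk : 1 ≤ k) :
    ∀ (fuel r l : Nat) (ans : Int), (zstartL cs).length - r = fuel → r ≤ (zstartL cs).length →
    l = (max 0 ((r : Int) - k)).toNat →
    winLoop cs ((zstartL cs).zip (zendL cs)) k r l ans =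
      some ((List.range' r ((zstartL cs).length - r)).foldl (bStep cs k) ans) := by
  intro fuel
  induction fuel with
  | zero =>
    intro r l ans hf hr hl
    have hrm : r = (zstartL cs).length := by omega
    rw [winLoop, dif_neg (by rw [List.length_zip, ← zlen_eq]; omega)]
    rw [hf, List.range'_zero, List.foldl_nil]
  | succ fuel ih =>
    intro r l ans hf hr hl
    have hzl : ((zstartL cs).zip (zendL cs)).length = (zstartL cs).length := by
      rw [List.length_zip, ← zlen_eq, Nat.min_self]
    have hrm : r < (zstartL cs).length := by omega
    rw [winLoop, dif_pos (by omega : r < ((zstartL cs).zip (zendL cs)).length)]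
    have hl' : lFinal l r k = (max 0 ((r : Int) + 1 - k)).toNat := by
      rw [lFinal_spec]
      split
      · next hcond => omega
      · next hcond => omega
    have hl'le : lFinal l r k < (zstartL cs).length := by
      rw [hl']; omega
    have hget : ((zstartL cs).zip (zendL cs))[lFinal l r k]? =
        some ((zstartL cs)[lFinal l r k]'(by omega), (zendL cs)[lFinal l r k]'(by rw [← zlen_eq]; omega)) := by
      rw [List.getElem?_eq_getElem (by omega)]
      congr 1
      exact List.getElem_zip
    have hgetr : ((zstartL cs).zip (zendL cs)).getD r (0, 0) =
        ((zstartL cs)[r]'(by omega), (zendL cs)[r]'(by rw [← zlen_eq]; omega)) := by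
      rw [List.getD_eq_getElem _ _ (by omega)]
      exact List.getElem_zip
    simp only [hget, hgetr]
    set L := (zstartL cs)[lFinal l r k]'(by omega) with hL
    have hLmem : L ∈ zstartL cs := List.getElem_mem _
    obtain ⟨hL1, hL2, hL3⟩ := zstart_mem cs L hLmem
    set R := (zendL cs)[r]'(by rw [← zlen_eq]; omega) with hR
    have hRmem : R ∈ zendL cs := List.getElem_mem _
    obtain ⟨hR1, hR2, hR3⟩ := zend_mem cs R hRmem
    rw [if_neg ?bonus1, if_neg ?bonus2]
    case bonus1 =>
      rintro ⟨hb1, hb2⟩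
      rcases hL3 with h | h
      · omega
      · exact h hb2
    case bonus2 =>
      rintro ⟨hb1, hb2⟩
      rcases hR3 with h | h
      · omega
      · exact h hb2
    rw [extL_eq cs L (by omega), extR_eq cs (R + 1)]
    rw [ih (r + 1) (lFinal l r k) _ (by omega) (by omega) (by rw [hl']; omega)]
    rw [show (zstartL cs).length - r = ((zstartL cs).length - (r + 1)) + 1 from by omega,
        List.range'_succ, List.foldl_cons]
    have hstep : bStep cs k ans r = max ans ((R : Int) - (L : Int) + 1 + 0 + 0
        + (osfx (cs.take L) : Int) + (opfx (cs.drop (R + 1)) : Int)) := by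
      unfold bStep
      simp only []
      have hidx : (max 0 ((r : Int) - k + 1)).toNat = lFinal l r k := by rw [hl']; omega
      rw [hidx, List.getD_eq_getElem (zstartL cs) 0 (by omega), ← hL,
          List.getD_eq_getElem (zendL cs) 0 (by rw [← zlen_eq]; omega), ← hR,
          obList_getD cs L (by omega), oaList_getD cs (R + 1) (by omega)]
      congr 1
      ring
    rw [hstep]

theorem main_eq (s : String) (k : Int) (hpre : 0 ≤ k ∨ ¬ ('0' ∈ s.toList)) :
    max_ones_with_reflection s k = max_ones_with_reflection_alt s k := by
  unfold max_ones_with_reflection max_ones_with_reflection_alt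
  simp only []
  set cs := s.toList with hcs
  by_cases h0 : cs.length = 0
  · rw [if_pos h0, if_pos h0]
  · rw [if_neg h0, if_neg h0]
    by_cases hz : zstartL cs = []
    · rw [if_pos (by rw [zr_zip, hz]; rfl), if_pos (by rw [hz]; rfl)]
    · have hm : ¬ ((zstartL cs).length = 0) := fun h => hz (List.eq_nil_of_length_eq_zero h)
      have hzr : ¬ (zrLoop cs 0 = []) := by
        rw [zr_zip]
        intro h
        apply hz
        have := congrArg List.length h
        rw [List.length_zip, ← zlen_eq, Nat.min_self] at this
        exact List.eq_nil_of_length_eq_zero this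
      rw [if_neg hzr, if_neg hm]
      have hzero_mem : '0' ∈ cs := by
        obtain ⟨p, hp⟩ := List.exists_mem_of_ne_nil _ hz
        obtain ⟨hp1, hp2, _⟩ := zstart_mem cs p hp
        rw [List.getD_eq_getElem _ _ hp1] at hp2
        rw [← hp2]
        exact List.getElem_mem _
      have hk0 : 0 ≤ k := by
        rcases hpre with h | h
        · exact h
        · exact absurd hzero_mem h
      by_cases hk : k = 0
      · rw [if_pos hk, if_pos (by omega)]
        have hob : obList cs = 0 :: ((List.range' 1 cs.length).map (fun p => osfx (cs.take p))) := by
          rw [obList_eq, List.range_eq_range', List.range'_succ, List.map_cons]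
          rfl
        rw [onesLoop_eq cs 0 0 (by omega) (by simp [osfx]) (fun _ _ => by simp [osfx])]
        rw [hob]
        simp only [Nat.sub_zero]
        rw [List.range'_succ, List.map_cons, List.foldl_cons]
        simp [osfx]
      · rw [if_neg hk, if_neg (by omega)]
        rw [zr_zip]
        rw [winLoop_eq cs k (by omega) ((zstartL cs).length) 0 0 0 (by omega) (by omega) (by omega)]
        rw [List.range_eq_range', Nat.sub_zero]
        rfl

-- ===== VERDICT (by name: the statement is the Claim_ definition above) =====
theorem max_ones_with_reflection_spec : Claim_equal_max_ones_with_reflection := by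
  intro s k _ hpre
  unfold Spec_max_ones_with_reflection
  exact main_eq s k hpre

theorem max_ones_with_reflection_raises : Claim_raises_max_ones_with_reflection := by
  unfold Claim_raises_max_ones_with_reflection
  constructor
  · intro s k _ hra hpre
    rcases hra with ⟨hk, hm⟩
    rcases hpre with h | h
    · omega
    · exact h hm
  · exact ⟨by decide, by decide, by decide⟩

-- self-check: the raise witness really lies in Raises_ and B's port returns the stated value there
theorem pvRaiseWitness_max_ones_with_reflection_ok :
    Raises_max_ones_with_reflection
      pvRaiseWitness_max_ones_with_reflection.1 pvRaiseWitness_max_ones_with_reflection.2 ∧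
    max_ones_with_reflection_alt
      pvRaiseWitness_max_ones_with_reflection.1 pvRaiseWitness_max_ones_with_reflection.2
      = pvRaiseWitnessOut_max_ones_with_reflection :=
  ⟨max_ones_with_reflection_raises.2.2.1, max_ones_with_reflection_raises.2.2.2⟩
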